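-- pv_equiv track=rewrite | github.com/nastyh/LeetCode | Basic Data Structures/1437_Check_If_All_1_Are_at_Least_Length_K_Places_Away.py | kLengthApart_bit_manipulation
-- ===== SOURCE A (Python) =====
-- def kLengthApart_bit_manipulation(nums, k):  # O(n) and O(1)
--     """
--     Convert binary array into integer x
--     base cases: return true if x == 0 or k == 0.
--     While x is greater than 1:
--     Remove trailing 1-bit with the right shift: x >>= 1.
--     Remove trailing zeros one by one, and count them using counter count.
--     The number of zeros in-between 1-bits should be greater or equal to k.
--     Hence, return false if count < k.
--     """
--     # convert binary array into int
--     x = 0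
--     for num in nums:
--         x = (x << 1) | num
--     # base case
--     if x == 0 or k == 0:
--         return True
--     # remove trailing zeros
--     while x & 1 == 0:
--         x = x >> 1
--     while x != 1:
--         # remove trailing 1-bit
--         x = x >> 1
--         # count trailing zeros
--         count = 0
--         while x & 1 == 0:
--             x = x >> 1
--             count += 1
--         # number of zeros in-between 1-bits
--         # should be greater than or equal to k
--         if count < k:
--             return False
--     return True
-- ===== SOURCE B (Python) =====
-- def kLengthApart_bit_manipulation(nums, k):
--     x = 0
--     for num in nums:
--         x = (x << 1) | num
--     if x < 0:
--         # a negative int has 1-bits at every position above its top bit, so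
--         # adjacent ones leave no gap: only a non-positive k can be satisfied
--         return k <= 0
--     gap = None  # zeros seen since the last 1-bit
--     while x:
--         if x & 1:
--             if gap is not None and gap < k:
--                 return False
--             gap = 0
--         elif gap is not None:
--             gap += 1
--         x >>= 1
--     return True
-- ===== Notes on version B (the rewrite author's own statement) =====
-- stated objective: simpler
-- what changed: Replaces A's three nested bit-stripping while-loops (strip trailing zeros, remove the 1-bit, count zeros, compare per 1-bit) by a single flat scan over the bits of the packed integer that counts zeros since the previous 1-bit, returning k <= 0 directly for a negative packed value; Pre_ excludes only the inputs (a negative entry together with k < 0) on which A loops forever.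
import Mathlib
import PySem

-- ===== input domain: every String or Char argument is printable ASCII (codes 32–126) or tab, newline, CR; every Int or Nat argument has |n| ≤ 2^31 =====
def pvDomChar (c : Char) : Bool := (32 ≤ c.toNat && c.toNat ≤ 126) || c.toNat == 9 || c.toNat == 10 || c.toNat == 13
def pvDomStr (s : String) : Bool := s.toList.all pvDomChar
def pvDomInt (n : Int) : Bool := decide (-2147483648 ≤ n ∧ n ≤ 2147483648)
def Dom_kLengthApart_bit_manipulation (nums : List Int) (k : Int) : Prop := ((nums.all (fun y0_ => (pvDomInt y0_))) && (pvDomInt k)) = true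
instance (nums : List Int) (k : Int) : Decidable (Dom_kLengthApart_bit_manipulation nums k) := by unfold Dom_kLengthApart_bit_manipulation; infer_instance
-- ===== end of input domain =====

-- B replaces A's three nested bit-stripping while-loops by one flat scan over the bits of the
-- packed integer, counting zeros since the previous 1-bit (objective: simpler).


-- ===== PORT A =====
-- x = 0; for num in nums: x = (x << 1) | num      (Python | and << are exact: PySem.Int.bor, <<<)
def pvBuild (nums : List Int) : Int :=
  nums.foldl (fun x num => PySem.Int.bor (x <<< (1:Nat)) num) 0

-- while x & 1 == 0: x = x >> 1                    (fuel-bounded; the fuel passed below is ample)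
def pvStrip : Nat → Int → Int
  | 0, x => x
  | f+1, x => if PySem.Int.band x 1 = 0 then pvStrip f (x >>> (1:Nat)) else x

-- count = 0; while x & 1 == 0: x = x >> 1; count += 1
def pvStripCount : Nat → Int → Int → Int × Int
  | 0, x, c => (x, c)
  | f+1, x, c => if PySem.Int.band x 1 = 0 then pvStripCount f (x >>> (1:Nat)) (c + 1) else (x, c)

-- while x != 1: x = x >> 1; <count trailing zeros>; if count < k: return False
def pvMain : Nat → Int → Int → Bool
  | 0, _, _ => true
  | f+1, x, k =>
    if x = 1 then true
    else
      let p := pvStripCount f (x >>> (1:Nat)) 0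
      if p.2 < k then false else pvMain f p.1 k

def kLengthApart_bit_manipulation (nums : List Int) (k : Int) : Bool :=
  let x := pvBuild nums
  if x = 0 ∨ k = 0 then true
  else
    let x1 := pvStrip (x.natAbs + 1) x
    pvMain (x1.natAbs + 1) x1 k

-- ===== PORT B =====
-- while x: if x & 1: (if gap is not None and gap < k: return False); gap = 0
--          elif gap is not None: gap += 1
--          x >>= 1                                 (fuel-bounded; the fuel passed below is ample)
def altBits : Nat → Int → Int → Option Int → Bool
  | 0, _, _, _ => true
  | f+1, k, x, gap =>
    if x = 0 then true
    else if PySem.Int.band x 1 ≠ 0 then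
      match gap with
      | some g => if g < k then false else altBits f k (x >>> (1:Nat)) (some 0)
      | none => altBits f k (x >>> (1:Nat)) (some 0)
    else altBits f k (x >>> (1:Nat)) (gap.map (· + 1))

def kLengthApart_bit_manipulation_alt (nums : List Int) (k : Int) : Bool :=
  let x := nums.foldl (fun x num => PySem.Int.bor (x <<< (1:Nat)) num) 0
  if x < 0 then decide (k ≤ 0)
  else altBits (x.natAbs + 1) k x none

-- ===== PRECONDITION & SPEC =====
-- Pre_ excludes exactly the inputs on which A never returns: an array containing a negative
-- entry (which packs to a negative accumulator) together with k < 0 makes A's bit-stripping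
-- while-loops cycle on a negative value forever.
def Pre_kLengthApart_bit_manipulation (nums : List Int) (k : Int) : Prop :=
  (∀ n ∈ nums, 0 ≤ n) ∨ 0 ≤ k
instance (nums : List Int) (k : Int) : Decidable (Pre_kLengthApart_bit_manipulation nums k) := by
  unfold Pre_kLengthApart_bit_manipulation; infer_instance

def pvWitness_kLengthApart_bit_manipulation : List Int × Int := ([1, 0, 0, 1], 2)

def Spec_kLengthApart_bit_manipulation (nums : List Int) (k : Int) (out : Bool) : Prop := out = kLengthApart_bit_manipulation_alt nums k
instance (nums : List Int) (k : Int) (out : Bool) : Decidable (Spec_kLengthApart_bit_manipulation nums k out) := by unfold Spec_kLengthApart_bit_manipulation; infer_instance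

-- ===== CLAIM (what is proved, stated in full; the proofs are below) =====
def Claim_equal_kLengthApart_bit_manipulation : Prop := ∀ (nums : List Int) (k : Int), Dom_kLengthApart_bit_manipulation nums k → Pre_kLengthApart_bit_manipulation nums k → Spec_kLengthApart_bit_manipulation nums k (kLengthApart_bit_manipulation nums k)

-- ===== LEMMAS AND PROOFS =====

-- ---- Python-primitive bridges ----

lemma band_one_emod (x : Int) : PySem.Int.band x 1 = x % 2 := by
  by_cases hx : 0 ≤ x
  · rw [PySem.Int.band_of_nonneg hx (by norm_num)]
    have h1 : (1:Int).toNat = 1 := rfl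
    rw [h1, Nat.and_one_is_mod]
    omega
  · unfold PySem.Int.band
    rw [if_neg hx, if_pos (by norm_num : (0:Int) ≤ 1)]
    have h1 : (1:Int).toNat = 1 := rfl
    rw [h1, Nat.and_comm, Nat.and_one_is_mod]
    have := Nat.mod_two_eq_zero_or_one ((-x - 1).toNat)
    omega

lemma shr_one (x : Int) : x >>> (1:Nat) = x / 2 := by
  rw [Int.shiftRight_eq_div_pow]; norm_num

lemma band2_eq (b v : Int) (hb : b = 0 ∨ b = 1) (hv : 0 ≤ v) :
    PySem.Int.band (b + 2 * v) 1 = b := by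
  rw [band_one_emod]; omega

lemma shr2_eq (b v : Int) (hb : b = 0 ∨ b = 1) (hv : 0 ≤ v) :
    (b + 2 * v) >>> (1:Nat) = v := by
  rw [shr_one]; omega

-- ---- value of a bit list (least-significant bit first) and the gap structure ----

def valR : List Int → Int
  | [] => 0
  | b :: t => b + 2 * valR t

def dz : List Int → List Int
  | [] => []
  | b :: t => if b = 1 then b :: t else dz t

def nz : List Int → Nat
  | [] => 0
  | b :: t => if b = 1 then 0 else nz t + 1

def gapsFrom : Nat → List Int → List Nat
  | _, [] => []
  | c, b :: t => if b = 1 then c :: gapsFrom 0 t else gapsFrom (c + 1) t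

def gaps : List Int → List Nat
  | [] => []
  | b :: t => if b = 1 then gapsFrom 0 t else gaps t

lemma valR_nonneg (r : List Int) (h : ∀ b ∈ r, b = 0 ∨ b = 1) : 0 ≤ valR r := by
  induction r with
  | nil => simp [valR]
  | cons b t ih =>
    have hb := h b (by simp)
    have := ih (fun x hx => h x (by simp [hx]))
    simp [valR]; omega

lemma valR_pos (r : List Int) (h : ∀ b ∈ r, b = 0 ∨ b = 1) (h1 : (1:Int) ∈ r) : 1 ≤ valR r := by
  induction r with
  | nil => simp at h1
  | cons b t ih =>
    have hb := h b (by simp)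
    have ht := valR_nonneg t (fun x hx => h x (by simp [hx]))
    rcases List.mem_cons.mp h1 with h1 | h1
    · simp [valR]; omega
    · have := ih (fun x hx => h x (by simp [hx])) h1
      simp [valR]; omega

lemma valR_zero (r : List Int) (h : ∀ b ∈ r, b = 0 ∨ b = 1) (h1 : (1:Int) ∉ r) : valR r = 0 := by
  induction r with
  | nil => simp [valR]
  | cons b t ih =>
    have hb := h b (by simp)
    have hb0 : b = 0 := hb.resolve_right (fun h' => absurd (h' ▸ List.mem_cons_self) h1)
    have := ih (fun x hx => h x (by simp [hx])) (fun hx => h1 (List.mem_cons_of_mem _ hx))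
    simp [valR, hb0, this]

lemma binary_tail {b : Int} {t : List Int} (h : ∀ x ∈ b :: t, x = 0 ∨ x = 1) :
    ∀ x ∈ t, x = 0 ∨ x = 1 := fun x hx => h x (by simp [hx])

lemma dz_binary (r : List Int) (h : ∀ b ∈ r, b = 0 ∨ b = 1) : ∀ b ∈ dz r, b = 0 ∨ b = 1 := by
  induction r with
  | nil => simp [dz]
  | cons b t ih =>
    by_cases hb : b = 1
    · simpa [dz, hb] using h
    · simpa [dz, hb] using ih (binary_tail h)

lemma dz_head (r : List Int) (h : ∀ b ∈ r, b = 0 ∨ b = 1) (h1 : (1:Int) ∈ r) :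
    ∃ t, dz r = 1 :: t := by
  induction r with
  | nil => simp at h1
  | cons b t ih =>
    by_cases hb : b = 1
    · exact ⟨t, by simp [dz, hb]⟩
    · have h1t : (1:Int) ∈ t := (List.mem_cons.mp h1).resolve_left (fun h' => hb h'.symm)
      simpa [dz, hb] using ih (binary_tail h) h1t

lemma vdz_le (r : List Int) (h : ∀ b ∈ r, b = 0 ∨ b = 1) : valR (dz r) ≤ valR r := by
  induction r with
  | nil => simp [dz]
  | cons b t ih =>
    have hb := h b (by simp)
    have ht := valR_nonneg t (binary_tail h)
    have hdz := ih (binary_tail h)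
    by_cases hb1 : b = 1
    · simp [dz, hb1]
    · have hb0 : b = 0 := hb.resolve_right hb1
      simp [dz, valR, hb0, hb1]; omega

-- ---- A's loops on the bit list ----

lemma strip_sim (r : List Int) : ∀ fuel : Nat, (∀ b ∈ r, b = 0 ∨ b = 1) → (1:Int) ∈ r →
    (valR r).natAbs < fuel → pvStrip fuel (valR r) = valR (dz r) := by
  induction r with
  | nil => intro fuel _ h1; simp at h1
  | cons b t ih =>
    intro fuel h h1 hf
    have hb := h b (by simp)
    have ht := valR_nonneg t (binary_tail h)
    match fuel with
    | 0 => have := valR_pos _ h h1; omega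
    | f+1 =>
      by_cases hb1 : b = 1
      · have hm : PySem.Int.band (valR (b :: t)) 1 = 1 := by
          simpa [valR, hb1] using band2_eq 1 (valR t) (Or.inr rfl) ht
        have hm' : ¬ PySem.Int.band (valR (b :: t)) 1 = 0 := by omega
        have ed : dz (b :: t) = b :: t := by rw [dz, if_pos hb1]
        simp only [pvStrip]
        rw [if_neg hm', ed]
      · have hb0 : b = 0 := hb.resolve_right hb1
        have h1t : (1:Int) ∈ t := (List.mem_cons.mp h1).resolve_left (fun h' => hb1 h'.symm)
        have hm : PySem.Int.band (valR (b :: t)) 1 = 0 := by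
          simpa [valR, hb0] using band2_eq 0 (valR t) (Or.inl rfl) ht
        have hd : (valR (b :: t)) >>> (1:Nat) = valR t := by
          simpa [valR, hb0] using shr2_eq 0 (valR t) (Or.inl rfl) ht
        have hf' : (valR t).natAbs < f := by
          have : valR (b :: t) = 2 * valR t := by simp [valR, hb0]
          have := valR_pos t (binary_tail h) h1t
          omega
        have ed : dz (b :: t) = dz t := by rw [dz, if_neg hb1]
        simp only [pvStrip]
        rw [if_pos hm, hd, ed]
        exact ih f (binary_tail h) h1t hf'

lemma stripCount_sim (r : List Int) : ∀ (fuel : Nat) (c : Int), (∀ b ∈ r, b = 0 ∨ b = 1) →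
    (1:Int) ∈ r → (valR r).natAbs < fuel →
    pvStripCount fuel (valR r) c = (valR (dz r), c + (nz r : Int)) := by
  induction r with
  | nil => intro fuel c _ h1; simp at h1
  | cons b t ih =>
    intro fuel c h h1 hf
    have hb := h b (by simp)
    have ht := valR_nonneg t (binary_tail h)
    match fuel with
    | 0 => have := valR_pos _ h h1; omega
    | f+1 =>
      by_cases hb1 : b = 1
      · have hm : PySem.Int.band (valR (b :: t)) 1 = 1 := by
          simpa [valR, hb1] using band2_eq 1 (valR t) (Or.inr rfl) ht
        have hm' : ¬ PySem.Int.band (valR (b :: t)) 1 = 0 := by omega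
        have ed : dz (b :: t) = b :: t := by rw [dz, if_pos hb1]
        have en : nz (b :: t) = 0 := by rw [nz, if_pos hb1]
        simp only [pvStripCount]
        rw [if_neg hm', ed, en]
        simp
      · have hb0 : b = 0 := hb.resolve_right hb1
        have h1t : (1:Int) ∈ t := (List.mem_cons.mp h1).resolve_left (fun h' => hb1 h'.symm)
        have hm : PySem.Int.band (valR (b :: t)) 1 = 0 := by
          simpa [valR, hb0] using band2_eq 0 (valR t) (Or.inl rfl) ht
        have hd : (valR (b :: t)) >>> (1:Nat) = valR t := by
          simpa [valR, hb0] using shr2_eq 0 (valR t) (Or.inl rfl) ht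
        have hf' : (valR t).natAbs < f := by
          have : valR (b :: t) = 2 * valR t := by simp [valR, hb0]
          have := valR_pos t (binary_tail h) h1t
          omega
        have ed : dz (b :: t) = dz t := by rw [dz, if_neg hb1]
        have en : nz (b :: t) = nz t + 1 := by rw [nz, if_neg hb1]
        simp only [pvStripCount]
        rw [if_pos hm, hd, ed, en, ih f (c + 1) (binary_tail h) h1t hf', Prod.mk.injEq]
        refine ⟨rfl, by push_cast; ring⟩

lemma gapsFrom_dz (r : List Int) : ∀ (t : List Int) (c : Nat), dz r = 1 :: t →
    gapsFrom c r = (c + nz r) :: gapsFrom 0 t := by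
  induction r with
  | nil => intro t c h; simp [dz] at h
  | cons b s ih =>
    intro t c h
    by_cases hb : b = 1
    · rw [dz, if_pos hb] at h
      injection h with hb' hst
      subst hst
      simp [gapsFrom, hb, nz]
    · rw [dz, if_neg hb] at h
      simp [gapsFrom, hb, nz, ih t (c + 1) h]
      omega

lemma gapsFrom_no_one (r : List Int) (h1 : (1:Int) ∉ r) : ∀ c, gapsFrom c r = [] := by
  induction r with
  | nil => intro c; simp [gapsFrom]
  | cons b t ih =>
    intro c
    have hb : b ≠ 1 := fun h => h1 (h ▸ List.mem_cons_self)
    have : (1:Int) ∉ t := fun h => h1 (List.mem_cons_of_mem _ h)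
    simp [gapsFrom, hb, ih this]

lemma gaps_no_one (l : List Int) (h1 : (1:Int) ∉ l) : gaps l = [] := by
  induction l with
  | nil => simp [gaps]
  | cons b t ih =>
    have hb : b ≠ 1 := fun h => h1 (h ▸ List.mem_cons_self)
    have : (1:Int) ∉ t := fun h => h1 (List.mem_cons_of_mem _ h)
    simp [gaps, hb, ih this]

lemma gaps_dz (r : List Int) : ∀ t : List Int, dz r = 1 :: t → gaps r = gapsFrom 0 t := by
  induction r with
  | nil => intro t h; simp [dz] at h
  | cons b s ih =>
    intro t h
    by_cases hb : b = 1
    · rw [dz, if_pos hb] at h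
      injection h with hb' hst
      subst hst
      simp [gaps, hb]
    · rw [dz, if_neg hb] at h
      simp [gaps, hb, ih t h]

lemma main_sim : ∀ (fuel : Nat) (r : List Int) (k : Int), (∀ b ∈ r, b = 0 ∨ b = 1) →
    (valR (1 :: r)).natAbs < fuel →
    pvMain fuel (valR (1 :: r)) k = (gapsFrom 0 r).all (fun g => decide (k ≤ (g:Int))) := by
  intro fuel
  induction fuel with
  | zero => intro r k h hf; have := valR_nonneg r h; simp [valR] at hf
  | succ f ih =>
    intro r k h hf
    have hr0 : 0 ≤ valR r := valR_nonneg r h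
    by_cases h1 : (1:Int) ∈ r
    · have hv : 1 ≤ valR r := valR_pos r h h1
      have hx : valR (1 :: r) ≠ 1 := by simp [valR]; omega
      have hd : (valR (1 :: r)) >>> (1:Nat) = valR r := by
        simpa [valR] using shr2_eq 1 (valR r) (Or.inr rfl) hr0
      have hfc : (valR r).natAbs < f := by simp [valR] at hf ⊢; omega
      have hsc := stripCount_sim r f 0 h h1 hfc
      obtain ⟨t, htz⟩ := dz_head r h h1
      have hgf := gapsFrom_dz r t 0 htz
      have hbt : ∀ b ∈ t, b = 0 ∨ b = 1 := by
        have := dz_binary r h; rw [htz] at this; exact binary_tail this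
      rw [htz] at hsc
      simp only [pvMain, if_neg hx, hd, hsc]
      rw [hgf, List.all_cons]
      by_cases hk : (0:Int) + (nz r : Int) < k
      · rw [if_pos hk]
        have hk2 : ¬ k ≤ ((nz r : Nat) : Int) := by omega
        simp [hk2]
      · rw [if_neg hk]
        have hk' : k ≤ ((nz r : Nat) : Int) := by omega
        have hvt : 0 ≤ valR t := valR_nonneg t hbt
        have hle : valR (dz r) ≤ valR r := vdz_le r h
        have hf2 : (valR (1 :: t)).natAbs < f := by
          rw [htz] at hle
          simp [valR] at hf hle ⊢; omega
        rw [ih t k hbt hf2]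
        simp [hk']
    · have hv0 : valR r = 0 := valR_zero r h h1
      have hx : valR (1 :: r) = 1 := by simp [valR, hv0]
      simp [pvMain, hx, gapsFrom_no_one r h1 0]

-- ---- B's flat scan over the bits, characterized by the gap list ----

lemma altBits_sim (r : List Int) : ∀ (fuel : Nat) (k : Int) (gap : Option Int),
    (∀ b ∈ r, b = 0 ∨ b = 1) → (valR r).natAbs < fuel → (∀ g, gap = some g → 0 ≤ g) →
    altBits fuel k (valR r) gap =
      (match gap with
       | some g => (gapsFrom g.toNat r).all (fun g' => decide (k ≤ (g':Int)))
       | none => (gaps r).all (fun g' => decide (k ≤ (g':Int)))) := by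
  induction r with
  | nil =>
    intro fuel k gap _ hf _
    match fuel with
    | 0 => omega
    | f+1 =>
      have : valR ([] : List Int) = 0 := rfl
      cases gap <;> simp [altBits, this, gapsFrom, gaps]
  | cons b t ih =>
    intro fuel k gap h hf hg
    have hb := h b (by simp)
    have ht := valR_nonneg t (binary_tail h)
    match fuel with
    | 0 => omega
    | f+1 =>
      by_cases hx0 : valR (b :: t) = 0
      · have h1 : (1:Int) ∉ b :: t := by
          intro h1
          have := valR_pos _ h h1
          omega
        cases gap <;>
          simp [altBits, hx0, gapsFrom_no_one _ h1, gaps_no_one _ h1]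
      · have hband : PySem.Int.band (valR (b :: t)) 1 = b := by
          simpa [valR] using band2_eq b (valR t) hb ht
        have hshr : (valR (b :: t)) >>> (1:Nat) = valR t := by
          simpa [valR] using shr2_eq b (valR t) hb ht
        by_cases hb1 : b = 1
        · subst hb1
          have hbne : PySem.Int.band (valR (1 :: t)) 1 ≠ 0 := by rw [hband]; norm_num
          have hf' : (valR t).natAbs < f := by
            have : valR (1 :: t) = 1 + 2 * valR t := by simp [valR]
            omega
          have hrec := ih f k (some 0) (binary_tail h) hf' (by simp)
          norm_num at hrec
          match gap with
          | none =>
            simp only [altBits, if_neg hx0, if_pos hbne, hshr]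
            rw [hrec]
            simp [gaps]
          | some g =>
            have hg0 : 0 ≤ g := hg g rfl
            simp only [altBits, if_neg hx0, if_pos hbne, hshr]
            have e : gapsFrom g.toNat (1 :: t) = g.toNat :: gapsFrom 0 t := by
              simp [gapsFrom]
            by_cases hgk : g < k
            · rw [if_pos hgk]
              have hd : decide (k ≤ ((g.toNat : Nat) : Int)) = false := by
                simp only [decide_eq_false_iff_not]; omega
              rw [e, List.all_cons, hd, Bool.false_and]
            · rw [if_neg hgk, hrec]
              have hd : decide (k ≤ ((g.toNat : Nat) : Int)) = true := by
                simp only [decide_eq_true_eq]; omega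
              rw [e, List.all_cons, hd, Bool.true_and]
        · have hb0 : b = 0 := hb.resolve_right hb1
          have hbeq : ¬ PySem.Int.band (valR (b :: t)) 1 ≠ 0 := by rw [hband, hb0]; norm_num
          have hf' : (valR t).natAbs < f := by
            have h2 : valR (b :: t) = 2 * valR t := by simp [valR, hb0]
            omega
          match gap with
          | none =>
            have hrec := ih f k none (binary_tail h) hf' (by simp)
            simp only [altBits, if_neg hx0, if_neg hbeq, hshr, Option.map_none]
            rw [hrec]
            simp [gaps, hb1]
          | some g =>
            have hg0 : 0 ≤ g := hg g rfl
            have hrec := ih f k (some (g + 1)) (binary_tail h) hf'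
              (by intro g' h'; simp at h'; omega)
            simp only [altBits, if_neg hx0, if_neg hbeq, hshr, Option.map_some]
            rw [hrec]
            have hcast : (g + 1).toNat = g.toNat + 1 := by omega
            simp [gapsFrom, hb1, hcast]

-- ---- the bit list of a non-negative integer ----

def bitsOf : Nat → List Int
  | 0 => []
  | n+1 => (((n+1) % 2 : Nat) : Int) :: bitsOf ((n+1) / 2)
decreasing_by exact Nat.div_lt_self (by omega) (by omega)

lemma bitsOf_binary (n : Nat) : ∀ b ∈ bitsOf n, b = 0 ∨ b = 1 := by
  induction n using Nat.strong_induction_on with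
  | _ n ih =>
    match n with
    | 0 => simp [bitsOf]
    | m+1 =>
      intro b hb
      rw [bitsOf] at hb
      rcases List.mem_cons.mp hb with h | h
      · have := Nat.mod_two_eq_zero_or_one (m+1)
        subst h
        rcases this with h' | h' <;> simp [h']
      · exact ih ((m+1)/2) (Nat.div_lt_self (by omega) (by omega)) b h

lemma valR_bitsOf (n : Nat) : valR (bitsOf n) = (n : Int) := by
  induction n using Nat.strong_induction_on with
  | _ n ih =>
    match n with
    | 0 => simp [bitsOf, valR]
    | m+1 =>
      rw [bitsOf, valR, ih ((m+1)/2) (Nat.div_lt_self (by omega) (by omega))]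
      have h1 := Nat.div_add_mod (m+1) 2
      push_cast
      omega

-- ---- negative-accumulator facts ----

lemma build_nonneg (l : List Int) : ∀ a : Int, 0 ≤ a → (∀ n ∈ l, 0 ≤ n) →
    0 ≤ List.foldl (fun x num => PySem.Int.bor (x <<< (1:Nat)) num) a l := by
  induction l with
  | nil => intro a ha _; simpa using ha
  | cons num t ih =>
    intro a ha h
    rw [List.foldl_cons]
    apply ih _ _ (fun n hn => h n (by simp [hn]))
    rw [PySem.Int.bor_of_nonneg (by rw [Int.shiftLeft_eq]; omega) (h num (by simp))]
    positivity

lemma strip_neg (fuel : Nat) : ∀ x : Int, x < 0 →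
    pvStrip fuel x < 0 ∧ (pvStrip fuel x).natAbs ≤ x.natAbs := by
  induction fuel with
  | zero => intro x hx; exact ⟨hx, le_rfl⟩
  | succ f ih =>
    intro x hx
    by_cases hc : PySem.Int.band x 1 = 0
    · have hsh : x >>> (1:Nat) = x / 2 := shr_one x
      have h1 : x / 2 < 0 := by omega
      have := ih (x / 2) h1
      simp only [pvStrip, if_pos hc, hsh]
      omega
    · simp only [pvStrip, if_neg hc]
      exact ⟨hx, le_rfl⟩

lemma stripCount_neg (fuel : Nat) : ∀ (x c : Int), x < 0 →
    ∃ (y : Int) (m : Nat), pvStripCount fuel x c = (y, c + (m : Int)) ∧ y < 0 ∧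
      y.natAbs + m ≤ x.natAbs := by
  induction fuel with
  | zero => intro x c hx; exact ⟨x, 0, by simp [pvStripCount], hx, by omega⟩
  | succ f ih =>
    intro x c hx
    by_cases hc : PySem.Int.band x 1 = 0
    · have hev : x % 2 = 0 := by rw [band_one_emod] at hc; exact hc
      have hsh : x >>> (1:Nat) = x / 2 := shr_one x
      have h1 : x / 2 < 0 := by omega
      obtain ⟨y, m, he, hy, hb⟩ := ih (x / 2) (c + 1) h1
      refine ⟨y, m + 1, ?_, hy, ?_⟩
      · simp only [pvStripCount, if_pos hc, hsh, he]
        congr 1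
        push_cast
        ring
      · have : (x / 2).natAbs + 1 ≤ x.natAbs := by omega
        omega
    · exact ⟨x, 0, by simp [pvStripCount, hc], hx, by omega⟩

lemma main_neg : ∀ (fuel : Nat) (x k : Int), x < 0 → 1 ≤ k → x.natAbs < fuel →
    pvMain fuel x k = false := by
  intro fuel
  induction fuel with
  | zero => intro x k hx _ hf; omega
  | succ f ih =>
    intro x k hx hk hf
    have hx1 : x ≠ 1 := by omega
    have hsh : x >>> (1:Nat) = x / 2 := shr_one x
    have h2 : x / 2 < 0 := by omega
    obtain ⟨y, m, he, hy, hb⟩ := stripCount_neg f (x / 2) 0 h2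
    simp only [pvMain, if_neg hx1, hsh, he]
    by_cases hm : (0:Int) + (m : Int) < k
    · rw [if_pos hm]
    · rw [if_neg hm]
      have hm1 : 1 ≤ m := by omega
      have hyf : y.natAbs < f := by omega
      exact ih y k hy hk hyf

-- ---- assembly ----

lemma main_theorem (nums : List Int) (k : Int)
    (hpre : (∀ n ∈ nums, 0 ≤ n) ∨ 0 ≤ k) :
    kLengthApart_bit_manipulation nums k = kLengthApart_bit_manipulation_alt nums k := by
  unfold kLengthApart_bit_manipulation kLengthApart_bit_manipulation_alt
  show (if pvBuild nums = 0 ∨ k = 0 then true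
        else pvMain ((pvStrip ((pvBuild nums).natAbs + 1) (pvBuild nums)).natAbs + 1)
          (pvStrip ((pvBuild nums).natAbs + 1) (pvBuild nums)) k)
      = (if pvBuild nums < 0 then decide (k ≤ 0)
         else altBits ((pvBuild nums).natAbs + 1) k (pvBuild nums) none)
  by_cases hxneg : pvBuild nums < 0
  · -- a negative entry was packed; Pre_ forces 0 ≤ k
    have hk : 0 ≤ k := by
      rcases hpre with h | h
      · exact absurd (build_nonneg nums 0 le_rfl h) (by simpa [pvBuild] using hxneg)
      · exact h
    rw [if_pos hxneg]
    by_cases hk0 : k = 0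
    · subst hk0
      rw [if_pos (Or.inr rfl)]
      simp
    · have hk1 : 1 ≤ k := by omega
      rw [if_neg (by omega : ¬ (pvBuild nums = 0 ∨ k = 0))]
      obtain ⟨hs1, hs2⟩ := strip_neg ((pvBuild nums).natAbs + 1) (pvBuild nums) hxneg
      rw [main_neg _ _ k hs1 hk1 (by omega)]
      simp
      omega
  · -- the packed value is non-negative: both sides are the gap condition of its bit list
    rw [if_neg hxneg]
    set x := pvBuild nums with hxdef
    have hx0 : 0 ≤ x := by omega
    set r := bitsOf x.toNat with hrdef
    have hbin : ∀ b ∈ r, b = 0 ∨ b = 1 := bitsOf_binary x.toNat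
    have hval : valR r = x := by rw [hrdef, valR_bitsOf]; omega
    have hB : altBits (x.natAbs + 1) k x none
        = (gaps r).all (fun g => decide (k ≤ (g:Int))) := by
      have h := altBits_sim r (x.natAbs + 1) k none hbin (by rw [hval]; omega) (by simp)
      rw [hval] at h
      exact h
    by_cases hbase : x = 0 ∨ k = 0
    · rw [if_pos hbase, hB]
      rcases hbase with hxz | hkz
      · have h1 : (1:Int) ∉ r := by
          intro h1
          have := valR_pos _ hbin h1
          omega
        simp [gaps_no_one _ h1]
      · subst hkz
        simp [List.all_eq_true]
    · rw [if_neg hbase]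
      push_neg at hbase
      obtain ⟨hxz, hkz⟩ := hbase
      have h1r : (1:Int) ∈ r := by
        by_contra h1
        exact hxz (by rw [← hval, valR_zero _ hbin h1])
      have hstrip := strip_sim r (x.natAbs + 1) hbin h1r (by rw [hval]; omega)
      rw [hval] at hstrip
      obtain ⟨t, htz⟩ := dz_head _ hbin h1r
      have hbt : ∀ b ∈ t, b = 0 ∨ b = 1 := by
        have := dz_binary _ hbin; rw [htz] at this; exact binary_tail this
      rw [hstrip, htz, main_sim ((valR (1 :: t)).natAbs + 1) t k hbt (by omega)]
      rw [hB, ← gaps_dz _ t htz]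

-- ===== VERDICT (by name: the statement is the Claim_ definition above) =====
theorem kLengthApart_bit_manipulation_spec : Claim_equal_kLengthApart_bit_manipulation := by
  intro nums k _ hpre
  exact main_theorem nums k hpre
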